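-- pv_equiv track=rewrite | github.com/ysm827/GitHub-Store | packaging/flatpak/generate-all-sources.py | get_repos_for_group
-- ===== SOURCE A (Python) =====
-- def get_repos_for_group(group):
--     """Get ordered list of repos to try for a given group."""
--     g = group.lower()
--     if any(g.startswith(p) for p in ["androidx.", "com.android.", "com.google.android.",
--             "com.google.firebase", "com.google.gms", "com.google.testing."]):
--         return ["https://dl.google.com/dl/android/maven2", "https://repo1.maven.org/maven2",
--                 "https://maven.pkg.jetbrains.space/public/p/compose/dev"]
--     if g.startswith("org.jetbrains.compose"):
--         return ["https://maven.pkg.jetbrains.space/public/p/compose/dev",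
--                 "https://repo1.maven.org/maven2", "https://plugins.gradle.org/m2"]
--     if g.startswith("org.gradle.") or g.startswith("gradle.plugin."):
--         return ["https://plugins.gradle.org/m2", "https://repo1.maven.org/maven2"]
--     return ["https://repo1.maven.org/maven2", "https://dl.google.com/dl/android/maven2",
--             "https://maven.pkg.jetbrains.space/public/p/compose/dev", "https://plugins.gradle.org/m2"]
-- ===== SOURCE B (Python) =====
-- # B: a character trie (prefix automaton) built once from the rules; lookup walks
-- # the lowered group one character at a time instead of testing startswith per prefix.
-- # Objective: alternative (single left-to-right scan of the group via an automaton).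
--
-- _RULES = [
--     ("androidx.", 1), ("com.android.", 1), ("com.google.android.", 1),
--     ("com.google.firebase", 1), ("com.google.gms", 1), ("com.google.testing.", 1),
--     ("org.jetbrains.compose", 2),
--     ("org.gradle.", 3), ("gradle.plugin.", 3),
-- ]
--
-- _REPOS = {
--     1: ["https://dl.google.com/dl/android/maven2", "https://repo1.maven.org/maven2",
--         "https://maven.pkg.jetbrains.space/public/p/compose/dev"],
--     2: ["https://maven.pkg.jetbrains.space/public/p/compose/dev",
--         "https://repo1.maven.org/maven2", "https://plugins.gradle.org/m2"],
--     3: ["https://plugins.gradle.org/m2", "https://repo1.maven.org/maven2"],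
-- }
--
-- _DEFAULT = ["https://repo1.maven.org/maven2", "https://dl.google.com/dl/android/maven2",
--             "https://maven.pkg.jetbrains.space/public/p/compose/dev", "https://plugins.gradle.org/m2"]
--
-- # trie node: dict mapping single chars to child nodes; key "" holds a payload
-- _TRIE = {}
-- for _prefix, _cat in _RULES:
--     _node = _TRIE
--     for _ch in _prefix:
--         _node = _node.setdefault(_ch, {})
--     _node[""] = _REPOS[_cat]
--
--
-- def get_repos_for_group(group):
--     node = _TRIE
--     for ch in group.lower():
--         if "" in node:
--             return node[""]
--         nxt = node.get(ch)
--         if nxt is None: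
--             return _DEFAULT
--         node = nxt
--     return node.get("", _DEFAULT)
-- ===== Notes on version B (the rewrite author's own statement) =====
-- stated objective: alternative
-- what changed: Replaced the per-prefix startswith cascade with a character trie (prefix automaton) built once from the rules; lookup is a single left-to-right walk over the lowered group that stops at the first payload node or on a missing edge.
import Mathlib
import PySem

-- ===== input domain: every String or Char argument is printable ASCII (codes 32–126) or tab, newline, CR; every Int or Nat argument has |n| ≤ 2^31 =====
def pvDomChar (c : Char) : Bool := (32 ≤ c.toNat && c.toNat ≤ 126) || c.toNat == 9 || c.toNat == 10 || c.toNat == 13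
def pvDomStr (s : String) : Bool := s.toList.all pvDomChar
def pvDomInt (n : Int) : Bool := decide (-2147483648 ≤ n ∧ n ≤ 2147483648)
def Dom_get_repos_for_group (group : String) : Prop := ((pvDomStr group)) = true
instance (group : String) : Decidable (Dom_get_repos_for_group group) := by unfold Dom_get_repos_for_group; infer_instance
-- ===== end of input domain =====

-- B replaces A's per-prefix startswith cascade with a character trie (prefix automaton)
-- built once from the rules and walked one character at a time; objective: alternative.


-- ===== PORT A =====
def get_repos_for_group (group : String) : List String :=
  let g := PySem.Str.lower group
  if ["androidx.", "com.android.", "com.google.android.",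
      "com.google.firebase", "com.google.gms", "com.google.testing."].any
        (fun p => PySem.Str.startswith g p) then
    ["https://dl.google.com/dl/android/maven2", "https://repo1.maven.org/maven2",
     "https://maven.pkg.jetbrains.space/public/p/compose/dev"]
  else if PySem.Str.startswith g "org.jetbrains.compose" then
    ["https://maven.pkg.jetbrains.space/public/p/compose/dev",
     "https://repo1.maven.org/maven2", "https://plugins.gradle.org/m2"]
  else if PySem.Str.startswith g "org.gradle." || PySem.Str.startswith g "gradle.plugin." then
    ["https://plugins.gradle.org/m2", "https://repo1.maven.org/maven2"]
  else
    ["https://repo1.maven.org/maven2", "https://dl.google.com/dl/android/maven2",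
     "https://maven.pkg.jetbrains.space/public/p/compose/dev", "https://plugins.gradle.org/m2"]

-- ===== PORT B =====
-- trie node: optional payload (python key "") plus an ordered child list (python dict)
mutual
inductive PvTrie where
  | node : Option (List String) → PvKids → PvTrie
  deriving DecidableEq
inductive PvKids where
  | nil : PvKids
  | cons : Char → PvTrie → PvKids → PvKids
  deriving DecidableEq
end

def pvRepos1 : List String :=
  ["https://dl.google.com/dl/android/maven2", "https://repo1.maven.org/maven2",
   "https://maven.pkg.jetbrains.space/public/p/compose/dev"]
def pvRepos2 : List String :=
  ["https://maven.pkg.jetbrains.space/public/p/compose/dev",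
   "https://repo1.maven.org/maven2", "https://plugins.gradle.org/m2"]
def pvRepos3 : List String :=
  ["https://plugins.gradle.org/m2", "https://repo1.maven.org/maven2"]
def pvDefault : List String :=
  ["https://repo1.maven.org/maven2", "https://dl.google.com/dl/android/maven2",
   "https://maven.pkg.jetbrains.space/public/p/compose/dev", "https://plugins.gradle.org/m2"]

def pvRules : List (String × List String) :=
  [("androidx.", pvRepos1), ("com.android.", pvRepos1), ("com.google.android.", pvRepos1),
   ("com.google.firebase", pvRepos1), ("com.google.gms", pvRepos1), ("com.google.testing.", pvRepos1),
   ("org.jetbrains.compose", pvRepos2),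
   ("org.gradle.", pvRepos3), ("gradle.plugin.", pvRepos3)]

-- the build loop of Source B: node = node.setdefault(ch, {}) down the prefix, then node[""] = repos
def pvKidsGet : PvKids → Char → Option PvTrie
  | .nil, _ => none
  | .cons c' t rest, c => if c' = c then some t else pvKidsGet rest c

def pvKidsSet : PvKids → Char → PvTrie → PvKids
  | .nil, c, t => .cons c t .nil
  | .cons c' t' rest, c, t =>
      if c' = c then .cons c' t rest else .cons c' t' (pvKidsSet rest c t)

def pvTrieInsert : PvTrie → List Char → List String → PvTrie
  | .node _ ks, [], v => .node (some v) ks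
  | .node val ks, c :: cs, v =>
      .node val (pvKidsSet ks c (pvTrieInsert ((pvKidsGet ks c).getD (.node none .nil)) cs v))
  termination_by structural _ l => l

def pvTrie : PvTrie :=
  pvRules.foldl (fun t r => pvTrieInsert t r.1.toList r.2) (.node none .nil)

-- the lookup loop of Source B: payload check, then follow the edge for the next char
mutual
def pvWalk : PvTrie → List Char → List String
  | .node (some v) _, _ => v
  | .node none _, [] => pvDefault
  | .node none ks, c :: r => pvWalkKids ks c r
  termination_by structural t => t
def pvWalkKids : PvKids → Char → List Char → List String
  | .nil, _, _ => pvDefault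
  | .cons c' t rest, c, r => if c' = c then pvWalk t r else pvWalkKids rest c r
  termination_by structural ks => ks
end

def get_repos_for_group_alt (group : String) : List String :=
  pvWalk pvTrie (PySem.Str.lower group).toList

-- ===== PRECONDITION & SPEC =====
def Spec_get_repos_for_group (group : String) (out : List String) : Prop := out = get_repos_for_group_alt group
instance (group : String) (out : List String) : Decidable (Spec_get_repos_for_group group out) := by unfold Spec_get_repos_for_group; infer_instance

-- ===== CLAIM (what is proved, stated in full; the proofs are below) =====
def Claim_equal_get_repos_for_group : Prop := ∀ (group : String), Dom_get_repos_for_group group → Spec_get_repos_for_group group (get_repos_for_group group)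

-- ===== LEMMAS AND PROOFS =====

-- entries of a trie in DFS order, and well-formedness (distinct child chars at every node)
mutual
def pvEntries : PvTrie → List (List Char × List String)
  | .node (some v) ks => ([], v) :: pvEntriesKids ks
  | .node none ks => pvEntriesKids ks
  termination_by structural t => t
def pvEntriesKids : PvKids → List (List Char × List String)
  | .nil => []
  | .cons c t rest => (pvEntries t).map (fun e => (c :: e.1, e.2)) ++ pvEntriesKids rest
  termination_by structural ks => ks
end

def pvHasChar : PvKids → Char → Bool
  | .nil, _ => false
  | .cons c' _ rest, c => c' == c || pvHasChar rest c

mutual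
def pvWf : PvTrie → Bool
  | .node _ ks => pvWfKids ks
  termination_by structural t => t
def pvWfKids : PvKids → Bool
  | .nil => true
  | .cons c t rest => pvWf t && !pvHasChar rest c && pvWfKids rest
  termination_by structural ks => ks
end

-- the first-matching-prefix reading of a trie's entries
def pvFind (es : List (List Char × List String)) (l : List Char) : List String :=
  (((es.find? (fun e => e.1.isPrefixOf l)).map Prod.snd)).getD pvDefault

theorem pvEntriesKids_head : (ks : PvKids) →
    ∀ e ∈ pvEntriesKids ks, ∃ c p, e.1 = c :: p ∧ pvHasChar ks c = true
  | .nil => by intro e h; simp [pvEntriesKids] at h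
  | .cons c t rest => by
      intro e h
      simp only [pvEntriesKids, List.mem_append, List.mem_map] at h
      rcases h with ⟨e', _, rfl⟩ | h
      · exact ⟨c, e'.1, rfl, by simp [pvHasChar]⟩
      · obtain ⟨c', p, hp, hc⟩ := pvEntriesKids_head rest e h
        exact ⟨c', p, hp, by simp [pvHasChar, hc]⟩
  termination_by structural ks => ks

theorem pvFind_nil_of_heads (es : List (List Char × List String))
    (h : ∀ e ∈ es, ∃ c p, e.1 = c :: p) : pvFind es [] = pvDefault := by
  have : es.find? (fun e => e.1.isPrefixOf []) = none := by
    rw [List.find?_eq_none]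
    intro e he
    obtain ⟨c, p, hp⟩ := h e he
    simp [hp]
  simp [pvFind, this]

mutual
theorem pvWalk_eq (t : PvTrie) (h : pvWf t = true) (l : List Char) :
    pvWalk t l = pvFind (pvEntries t) l := by
  match t with
  | .node (some v) ks =>
      simp [pvWalk, pvEntries, pvFind, List.isPrefixOf]
  | .node none ks =>
      have hks : pvWfKids ks = true := by simpa [pvWf] using h
      match l with
      | [] =>
          rw [pvWalk, pvEntries, pvFind_nil_of_heads]
          intro e he
          obtain ⟨c, p, hp, _⟩ := pvEntriesKids_head ks e he
          exact ⟨c, p, hp⟩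
      | c :: r =>
          rw [pvWalk, pvEntries]
          exact pvWalkKids_eq ks hks c r
theorem pvWalkKids_eq (ks : PvKids) (h : pvWfKids ks = true) (c : Char) (r : List Char) :
    pvWalkKids ks c r = pvFind (pvEntriesKids ks) (c :: r) := by
  match ks with
  | .nil => simp [pvWalkKids, pvEntriesKids, pvFind]
  | .cons c' t rest =>
      simp only [pvWfKids, Bool.and_eq_true, Bool.not_eq_true'] at h
      obtain ⟨⟨hwf, hnc⟩, hrest⟩ := h
      rw [pvWalkKids, pvEntriesKids]
      by_cases hc : c' = c
      · subst hc
        simp only [if_true]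
        rw [pvWalk_eq t hwf r]
        unfold pvFind
        rw [List.find?_append, List.find?_map]
        have hpred : ((fun e : List Char × List String => e.1.isPrefixOf (c' :: r)) ∘
            (fun e : List Char × List String => (c' :: e.1, e.2))) =
            (fun e : List Char × List String => e.1.isPrefixOf r) := by
          funext e; simp [List.isPrefixOf]
        rw [hpred]
        cases hfind : (pvEntries t).find? (fun e => e.1.isPrefixOf r) with
        | some e => simp
        | none =>
            simp only [Option.map_none, Option.none_or]
            have : (pvEntriesKids rest).find?
                (fun e => e.1.isPrefixOf (c' :: r)) = none := by
              rw [List.find?_eq_none]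
              intro e he
              obtain ⟨c'', p, hp, hcc⟩ := pvEntriesKids_head rest e he
              have : c'' ≠ c' := fun hh => by subst hh; rw [hcc] at hnc; cases hnc
              simp [hp, List.isPrefixOf, this]
            simp [this]
      · simp only [if_neg hc]
        rw [pvWalkKids_eq rest hrest c r]
        unfold pvFind
        rw [List.find?_append, List.find?_map]
        have : ((fun e : List Char × List String => e.1.isPrefixOf (c :: r)) ∘
            (fun e : List Char × List String => (c' :: e.1, e.2))) =
            (fun _ : List Char × List String => false) := by
          funext e; simp [List.isPrefixOf, hc]
        have h0 : (pvEntries t).find? (fun _ => false) = none :=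
          List.find?_eq_none.mpr (fun x _ => by simp)
        rw [this, h0]
        simp
end

theorem pvWf_pvTrie : pvWf pvTrie = true := by
  simp [pvTrie, pvRules, pvTrieInsert, pvKidsSet, pvKidsGet, pvWf, pvWfKids, pvHasChar]

theorem pvEntries_pvTrie :
    pvEntries pvTrie =
      [("androidx.".toList, pvRepos1), ("com.android.".toList, pvRepos1),
       ("com.google.android.".toList, pvRepos1), ("com.google.firebase".toList, pvRepos1),
       ("com.google.gms".toList, pvRepos1), ("com.google.testing.".toList, pvRepos1),
       ("org.jetbrains.compose".toList, pvRepos2),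
       ("org.gradle.".toList, pvRepos3), ("gradle.plugin.".toList, pvRepos3)] := by
  simp [pvTrie, pvRules, pvTrieInsert, pvKidsSet, pvKidsGet, pvEntries, pvEntriesKids]

theorem pvStartswith_isPrefixOf (s p : String) :
    PySem.Str.startswith s p = p.toList.isPrefixOf s.toList := by
  rw [Bool.eq_iff_iff]
  simp [PySem.Chars.startswith_iff, List.isPrefixOf_iff_prefix]

-- ===== VERDICT (by name: the statement is the Claim_ definition above) =====
theorem get_repos_for_group_spec : Claim_equal_get_repos_for_group := by
  intro group _
  unfold Spec_get_repos_for_group get_repos_for_group get_repos_for_group_alt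
  rw [pvWalk_eq pvTrie pvWf_pvTrie, pvEntries_pvTrie]
  unfold pvFind
  simp only [List.find?, List.any_cons, List.any_nil, Bool.or_false, pvStartswith_isPrefixOf]
  generalize "androidx.".toList.isPrefixOf (PySem.Str.lower group).toList = b1
  generalize "com.android.".toList.isPrefixOf (PySem.Str.lower group).toList = b2
  generalize "com.google.android.".toList.isPrefixOf (PySem.Str.lower group).toList = b3
  generalize "com.google.firebase".toList.isPrefixOf (PySem.Str.lower group).toList = b4
  generalize "com.google.gms".toList.isPrefixOf (PySem.Str.lower group).toList = b5
  generalize "com.google.testing.".toList.isPrefixOf (PySem.Str.lower group).toList = b6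
  generalize "org.jetbrains.compose".toList.isPrefixOf (PySem.Str.lower group).toList = b7
  generalize "org.gradle.".toList.isPrefixOf (PySem.Str.lower group).toList = b8
  generalize "gradle.plugin.".toList.isPrefixOf (PySem.Str.lower group).toList = b9
  cases b1 <;> cases b2 <;> cases b3 <;> cases b4 <;> cases b5 <;> cases b6 <;>
    cases b7 <;> cases b8 <;> cases b9 <;> rfl
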